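-- pv_equiv track=rewrite | github.com/Landcruiser87/AoC2024 | scripts/day7/farts.py | generate_expressions
-- ===== SOURCE A (Python) =====
-- from itertools import product
--
-- def generate_expressions(num_str:str):
--     numbers = num_str.split()
--     operators = ['+', '*']
--
--     # Generate all possible combinations of operators
--     operator_combinations = product(operators, repeat=len(numbers) - 1)
--
--     expressions = []
--     for op_combo in operator_combinations:
--         expression = numbers[0]
--         for num, op in zip(numbers[1:], op_combo):
--             expression += op + num
--         expressions.append(expression)
--
--     return expressions
-- ===== SOURCE B (Python) =====
-- def generate_expressions(num_str: str):
--     numbers = num_str.split()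
--     if not numbers:
--         raise ValueError("need at least one number")
--
--     def build(prefix, remaining):
--         if not remaining:
--             return [prefix]
--         out = []
--         for op in ('+', '*'):
--             out.extend(build(prefix + op + remaining[0], remaining[1:]))
--         return out
--
--     return build(numbers[0], numbers[1:])
-- ===== Notes on version B (the rewrite author's own statement) =====
-- stated objective: alternative
-- what changed: Replaces itertools.product over operator tuples plus a zip/fold loop by a direct recursive descent build(prefix, remaining) that extends the prefix with each operator in product's order at each number.
import Mathlib
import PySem

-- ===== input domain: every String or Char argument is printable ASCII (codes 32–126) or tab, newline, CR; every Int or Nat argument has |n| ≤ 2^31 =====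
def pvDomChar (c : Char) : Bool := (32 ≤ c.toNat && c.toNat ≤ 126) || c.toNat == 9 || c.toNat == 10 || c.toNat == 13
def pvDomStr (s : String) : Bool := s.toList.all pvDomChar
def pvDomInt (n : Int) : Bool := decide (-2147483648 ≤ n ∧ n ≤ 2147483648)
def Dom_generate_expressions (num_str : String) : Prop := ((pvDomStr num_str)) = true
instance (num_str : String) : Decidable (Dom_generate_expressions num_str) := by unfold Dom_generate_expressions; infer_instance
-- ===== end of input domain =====

-- B replaces itertools.product plus a zip/fold loop by a direct recursive descent
-- build(pfx, remaining) ('+' before '*'); alternative decomposition, same cost.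
-- Pre_ excludes inputs with no whitespace-separated tokens, where both A and B raise ValueError.


-- ===== PORT A =====
-- product(['+','*'], repeat=k): leftmost position varies slowest
def pvProduct : Nat → List (List String)
  | 0 => [[]]
  | n + 1 => (["+", "*"]).flatMap (fun op => (pvProduct n).map (op :: ·))

def generate_expressions (num_str : String) : List String :=
  let numbers := PySem.Str.split₀ num_str
  let combos := pvProduct (numbers.length - 1)
  combos.map (fun combo =>
    (List.zip numbers.tail combo).foldl (fun e p => e ++ p.2 ++ p.1) (numbers.headD ""))

-- ===== PORT B =====
def pvBuild (pfx : String) : List String → List String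
  | [] => [pfx]
  | x :: rest => pvBuild (pfx ++ "+" ++ x) rest ++ pvBuild (pfx ++ "*" ++ x) rest

def generate_expressions_alt (num_str : String) : List String :=
  match PySem.Str.split₀ num_str with
  | [] => []  -- unreachable under Pre_: Python B raises ValueError here, like A
  | n :: rest => pvBuild n rest

-- ===== PRECONDITION & SPEC =====
-- Pre_ excludes strings with no tokens: A raises ValueError (product repeat = -1) there.
def Pre_generate_expressions (num_str : String) : Prop := PySem.Str.split₀ num_str ≠ []
instance (num_str : String) : Decidable (Pre_generate_expressions num_str) := by
  unfold Pre_generate_expressions; infer_instance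
def pvWitness_generate_expressions : String := "1 2 3"

def Spec_generate_expressions (num_str : String) (out : List String) : Prop := out = generate_expressions_alt num_str
instance (num_str : String) (out : List String) : Decidable (Spec_generate_expressions num_str out) := by unfold Spec_generate_expressions; infer_instance

-- ===== CLAIM (what is proved, stated in full; the proofs are below) =====
def Claim_equal_generate_expressions : Prop := ∀ (num_str : String), Dom_generate_expressions num_str → Pre_generate_expressions num_str → Spec_generate_expressions num_str (generate_expressions num_str)

-- ===== LEMMAS AND PROOFS =====
theorem pvBuild_eq_product (rest : List String) :
    ∀ (pfx : String),
      pvBuild pfx rest =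
        (pvProduct rest.length).map
          (fun combo => (List.zip rest combo).foldl (fun e p => e ++ p.2 ++ p.1) pfx) := by
  induction rest with
  | nil => intro pfx; simp [pvBuild, pvProduct]
  | cons x xs ih =>
      intro pfx
      simp only [pvBuild, List.length_cons, pvProduct, List.flatMap_cons, List.flatMap_nil,
        List.map_append, List.map_map, List.append_nil]
      rw [ih, ih]
      rfl

-- ===== VERDICT (by name: the statement is the Claim_ definition above) =====
theorem generate_expressions_spec : Claim_equal_generate_expressions := by
  intro num_str _ hpre
  unfold Spec_generate_expressions generate_expressions generate_expressions_alt
  cases h : PySem.Str.split₀ num_str with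
  | nil => exact absurd h hpre
  | cons n rest =>
      simp only [List.length_cons, Nat.add_sub_cancel, List.tail_cons, List.headD_cons]
      exact (pvBuild_eq_product rest n).symm
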